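-- pv_equiv track=rewrite | github.com/ElianaHarriet/TDA | dinamica.py | costos_combinaciones
-- ===== SOURCE A (Python) =====
-- def generar_combinaciones(weeks, r, c):
--     if len(weeks) == 0:
--         return []
--
--     # si contrato a Arganzón
--     opcion1 = generar_combinaciones(weeks[1:], r, c)
--     combinaciones1 = []
--     for opcion in opcion1:
--         combinaciones1.append(["A"] + opcion)
--     if len(combinaciones1) == 0:
--         combinaciones1.append(["A"])
--
--     # si contrato a Fuddle
--     opcion2 = []
--     if len(weeks) >= 3:
--         opcion2 = generar_combinaciones(weeks[3:], r, c)
--     combinaciones2 = []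
--     for opcion in opcion2:
--         combinaciones2.append(["FFF"] + opcion)
--     if len(combinaciones2) == 0:
--         combinaciones2.append(["FFF"])
--
--     return combinaciones1 + combinaciones2
--
-- def costos_combinaciones(weeks, r, c):
--     combinaciones = generar_combinaciones(weeks, r, c)
--     costos = []
--     for combinacion in combinaciones:
--         costo = 0
--         for i in range(len(combinacion)):
--             if combinacion[i] == "A":
--                 costo += weeks[i] * r
--             else:
--                 costo += c
--         costos.append(costo)
--     return costos
-- ===== SOURCE B (Python) =====
-- def costos_combinaciones(weeks, r, c):
--     if not weeks:
--         return []
--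
--     def rec(n, pos, acc):
--         # one decision at token position `pos`: hire "A" (consumes 1 week) or "FFF" (consumes 3)
--         out = []
--         a1 = acc + weeks[pos] * r
--         if n == 1:
--             out.append(a1)
--         else:
--             out.extend(rec(n - 1, pos + 1, a1))
--         a2 = acc + c
--         if n > 3:
--             out.extend(rec(n - 3, pos + 1, a2))
--         else:
--             out.append(a2)
--         return out
--
--     return rec(len(weeks), 0, 0)
-- ===== Notes on version B (the rewrite author's own statement) =====
-- stated objective: alternative
-- what changed: B never materializes the exponential list of A/FFF combination lists: it recurses on the remaining-week count and the token position, threading the accumulated cost, and emits each combination's total cost directly in the same order (output size itself is exponential, so both remain exponential overall).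
import Mathlib
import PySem

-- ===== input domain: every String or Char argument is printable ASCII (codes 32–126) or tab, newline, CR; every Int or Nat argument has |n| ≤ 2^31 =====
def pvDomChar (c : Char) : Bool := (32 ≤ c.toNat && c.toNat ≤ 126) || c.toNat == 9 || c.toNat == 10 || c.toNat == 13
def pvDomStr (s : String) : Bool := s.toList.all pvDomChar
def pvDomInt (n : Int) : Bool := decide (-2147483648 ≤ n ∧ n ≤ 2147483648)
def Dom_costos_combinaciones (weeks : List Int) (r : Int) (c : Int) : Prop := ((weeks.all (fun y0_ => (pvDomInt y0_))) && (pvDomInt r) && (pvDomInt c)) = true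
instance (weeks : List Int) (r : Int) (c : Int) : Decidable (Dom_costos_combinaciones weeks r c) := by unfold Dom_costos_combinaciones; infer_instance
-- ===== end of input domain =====

-- B replaces A's 'build every A/FFF combination list, then re-price each one' with a single
-- cost-accumulating recursion that never materializes the combinations (alternative algorithm, less work per combination).

-- ===== PORT A =====
-- helper generar_combinaciones (r, c kept though unused, as in the Python)
def pvGenerar (weeks : List Int) (r : Int) (c : Int) : List (List String) :=
  match weeks with
  | [] => []
  | _ :: t =>
    let opcion1 := pvGenerar t r c
    let combinaciones1 := opcion1.map (fun o => "A" :: o)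
    let combinaciones1 := if combinaciones1.length = 0 then [["A"]] else combinaciones1
    let opcion2 := if 3 ≤ t.length + 1 then pvGenerar (t.drop 2) r c else []
    let combinaciones2 := opcion2.map (fun o => "FFF" :: o)
    let combinaciones2 := if combinaciones2.length = 0 then [["FFF"]] else combinaciones2
    combinaciones1 ++ combinaciones2
termination_by weeks.length
decreasing_by all_goals simp

-- inner pricing loop: 'for i in range(len(combinacion))'; indices are always in range
-- (each token consumes ≥ 1 week), so getD's default is never used
def pvCosto (weeks : List Int) (r : Int) (c : Int) (comb : List String) : Int :=
  (List.range comb.length).foldl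
    (fun costo i => if comb.getD i "" = "A" then costo + weeks.getD i 0 * r else costo + c) 0

def costos_combinaciones (weeks : List Int) (r : Int) (c : Int) : List Int :=
  (pvGenerar weeks r c).map (pvCosto weeks r c)

-- ===== PORT B =====
-- rec(n, pos, acc) of Source B; the n = 0 case is unreachable (rec is only called with n ≥ 1)
-- and exists solely to make the recursion total
def altRec (weeks : List Int) (r : Int) (c : Int) (n pos : Nat) (acc : Int) : List Int :=
  if _hn : n = 0 then []
  else
    let a1 := acc + weeks.getD pos 0 * r
    let part1 := if n = 1 then [a1] else altRec weeks r c (n - 1) (pos + 1) a1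
    let a2 := acc + c
    let part2 := if 3 < n then altRec weeks r c (n - 3) (pos + 1) a2 else [a2]
    part1 ++ part2
termination_by n
decreasing_by all_goals omega

def costos_combinaciones_alt (weeks : List Int) (r : Int) (c : Int) : List Int :=
  if weeks.length = 0 then [] else altRec weeks r c weeks.length 0 0

-- ===== PRECONDITION & SPEC =====
def Spec_costos_combinaciones (weeks : List Int) (r : Int) (c : Int) (out : List Int) : Prop := out = costos_combinaciones_alt weeks r c
instance (weeks : List Int) (r : Int) (c : Int) (out : List Int) : Decidable (Spec_costos_combinaciones weeks r c out) := by unfold Spec_costos_combinaciones; infer_instance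

-- ===== CLAIM (what is proved, stated in full; the proofs are below) =====
def Claim_equal_costos_combinaciones : Prop := ∀ (weeks : List Int) (r : Int) (c : Int), Dom_costos_combinaciones weeks r c → Spec_costos_combinaciones weeks r c (costos_combinaciones weeks r c)

-- ===== LEMMAS AND PROOFS =====

-- generar_combinaciones depends only on the LENGTH of weeks; genN is that length-indexed form
def genN : Nat → List (List String)
  | 0 => []
  | Nat.succ m =>
    let c1 := if m = 0 then [["A"]] else (genN m).map (fun o => "A" :: o)
    let c2 := if 2 < m then (genN (m - 2)).map (fun o => "FFF" :: o) else [["FFF"]]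
    c1 ++ c2

lemma genN_ne_nil : ∀ n : Nat, 0 < n → genN n ≠ [] := by
  intro n
  induction n using Nat.strong_induction_on with
  | _ n ih =>
    intro hn
    match n, hn with
    | Nat.succ m, _ =>
      simp only [genN]
      by_cases h2 : 2 < m
      · simp only [if_pos h2]
        have := ih (m - 2) (by omega) (by omega)
        intro habs
        rcases List.append_eq_nil_iff.mp habs with ⟨_, h⟩
        exact this (List.map_eq_nil_iff.mp h)
      · simp [if_neg h2]

lemma pvGenerar_eq_genN (r c : Int) : ∀ (n : Nat) (weeks : List Int), weeks.length = n →
    pvGenerar weeks r c = genN n := by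
  intro n
  induction n using Nat.strong_induction_on with
  | _ n ih =>
    intro weeks hw
    match weeks with
    | [] =>
      simp at hw; subst hw; simp [pvGenerar, genN]
    | w :: t =>
      have hm : t.length + 1 = n := by simpa using hw
      rw [pvGenerar]
      have h1 : pvGenerar t r c = genN t.length := ih t.length (by omega) t rfl
      have hn : n = t.length + 1 := hm.symm
      subst hn
      simp only [h1, genN]
      congr 1
      · -- combinaciones1
        by_cases h0 : t.length = 0
        · simp [h0, genN]
        · have : genN t.length ≠ [] := genN_ne_nil _ (by omega)
          simp [h0, List.length_eq_zero_iff, this]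
      · -- combinaciones2
        by_cases h3 : 3 ≤ t.length + 1
        · simp only [if_pos h3]
          have h2 : pvGenerar (t.drop 2) r c = genN (t.length - 2) :=
            ih (t.length - 2) (by omega) (t.drop 2) (by simp)
          rw [h2]
          by_cases hgt : 2 < t.length
          · have : genN (t.length - 2) ≠ [] := genN_ne_nil _ (by omega)
            simp [hgt, List.length_eq_zero_iff, this]
          · have : t.length - 2 = 0 := by omega
            simp [this, genN, hgt]
        · simp [show ¬ 2 ≤ t.length from by omega]
          intro h'
          exact absurd h' (by omega)

-- cost of one combination, read off token by token from position p with accumulator acc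
def costShift (weeks : List Int) (r : Int) (c : Int) : Nat → Int → List String → Int
  | _, acc, [] => acc
  | p, acc, tok :: rest =>
      costShift weeks r c (p + 1) (if tok = "A" then acc + weeks.getD p 0 * r else acc + c) rest

lemma foldl_range_succ {β : Type} (n : Nat) (h : β → Nat → β) (a : β) :
    (List.range (n + 1)).foldl h a = (List.range n).foldl (fun b i => h b (i + 1)) (h a 0) := by
  rw [List.range_succ_eq_map, List.foldl_cons, List.foldl_map]

lemma costo_foldl_eq_costShift (weeks : List Int) (r c : Int) :
    ∀ (comb : List String) (p : Nat) (acc : Int),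
      (List.range comb.length).foldl
        (fun costo i => if comb.getD i "" = "A" then costo + weeks.getD (p + i) 0 * r
                        else costo + c) acc
      = costShift weeks r c p acc comb := by
  intro comb
  induction comb with
  | nil => intro p acc; simp [costShift]
  | cons tok rest ih =>
    intro p acc
    rw [List.length_cons, foldl_range_succ]
    simp only [List.getD_cons_succ, List.getD_cons_zero, Nat.add_zero]
    have hfun : (fun (b : Int) (i : Nat) =>
        if rest.getD i "" = "A" then b + weeks.getD (p + (i + 1)) 0 * r else b + c)
        = (fun (b : Int) (i : Nat) =>
        if rest.getD i "" = "A" then b + weeks.getD (p + 1 + i) 0 * r else b + c) := by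
      funext b i
      have h : p + (i + 1) = p + 1 + i := by omega
      rw [h]
    rw [hfun, ih (p + 1)]
    simp [costShift]

lemma pvCosto_eq_costShift (weeks : List Int) (r c : Int) :
    pvCosto weeks r c = costShift weeks r c 0 0 := by
  funext comb
  rw [pvCosto, ← costo_foldl_eq_costShift weeks r c comb 0 0]
  congr 1
  funext b i
  simp

lemma map_costShift_genN (weeks : List Int) (r c : Int) :
    ∀ (n : Nat), 0 < n → ∀ (pos : Nat) (acc : Int),
      (genN n).map (costShift weeks r c pos acc) = altRec weeks r c n pos acc := by
  intro n
  induction n using Nat.strong_induction_on with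
  | _ n ih =>
    intro hn pos acc
    match n, hn with
    | Nat.succ m, _ =>
      rw [altRec]
      simp only [genN, Nat.succ_ne_zero, List.map_append]
      congr 1
      · -- part1
        by_cases h0 : m = 0
        · simp [h0, costShift]
        · have h1 : ¬ (m + 1 = 1) := by omega
          rw [if_neg h0, if_neg h1]
          have : (m + 1) - 1 = m := by omega
          rw [this, ← ih m (by omega) (by omega) (pos + 1) (acc + weeks.getD pos 0 * r)]
          rw [List.map_map]
          refine List.map_congr_left ?_
          intro o _
          simp [costShift]
      · -- part2
        by_cases h2 : 2 < m
        · have h3 : 3 < m + 1 := by omega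
          rw [if_pos h2, if_pos h3]
          have : (m + 1) - 3 = m - 2 := by omega
          rw [this, ← ih (m - 2) (by omega) (by omega) (pos + 1) (acc + c)]
          rw [List.map_map]
          refine List.map_congr_left ?_
          intro o _
          simp [costShift]
        · rw [if_neg h2, if_neg (show ¬ 3 < m + 1 by omega)]
          simp [costShift]

-- ===== VERDICT (by name: the statement is the Claim_ definition above) =====
theorem costos_combinaciones_spec : Claim_equal_costos_combinaciones := by
  intro weeks r c _
  unfold Spec_costos_combinaciones costos_combinaciones costos_combinaciones_alt
  by_cases h : weeks.length = 0
  · have : weeks = [] := List.length_eq_zero_iff.mp h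
    subst this
    simp [pvGenerar]
  · rw [if_neg h]
    rw [pvGenerar_eq_genN r c weeks.length weeks rfl, pvCosto_eq_costShift]
    exact map_costShift_genN weeks r c weeks.length (by omega) 0 0
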